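-- pv_equiv track=rewrite | github.com/JonathanThing/ECE298A-RLE-Tool | b.py | enforce_rle_constraints
-- ===== SOURCE A (Python) =====
-- def enforce_rle_constraints(rle_strips):
--     for i in range(len(rle_strips)):
--         if rle_strips[i]['length'] < 3:
--             rle_strips[i]['length'] = 3
--     for group_start in range(0, len(rle_strips), 6):
--         group_end = min(group_start + 6, len(rle_strips))
--         group = rle_strips[group_start:group_end]
--         total_length = sum(strip['length'] for strip in group)
--         if total_length < 36:
--             deficit = 36 - total_length
--             pixels_per_strip = deficit // len(group)
--             remainder = deficit % len(group)
--             for i, strip in enumerate(group):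
--                 strip['length'] += pixels_per_strip
--                 if i < remainder:
--                     strip['length'] += 1
--     return rle_strips
-- ===== SOURCE B (Python) =====
-- def enforce_rle_constraints(rle_strips):
--     def fix(strips):
--         if not strips:
--             return []
--         head = [dict(s, length=max(s['length'], 3)) for s in strips[:6]]
--         deficit = 36 - sum(s['length'] for s in head)
--         n = len(head)
--         adjusted = [dict(s, length=s['length'] + max(0, -((i - deficit) // n)))
--                     for i, s in enumerate(head)]
--         return adjusted + fix(strips[6:])
--     return fix(rle_strips)
-- ===== Notes on version B (the rewrite author's own statement) =====
-- stated objective: alternative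
-- what changed: A's two in-place index passes (clamp loop, then per-6-chunk divmod split of the deficit into quotient plus a remainder branch) are replaced by one pure structural recursion that peels 6 strips at a time and gives strip i the closed-form ceiling top-up max(0, ceil((deficit-i)/n)) -- no second pass, no quotient/remainder pair, no branch, no mutation; return-value equivalence only since Python A mutates its argument in place while B builds fresh dicts.
import Mathlib
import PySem

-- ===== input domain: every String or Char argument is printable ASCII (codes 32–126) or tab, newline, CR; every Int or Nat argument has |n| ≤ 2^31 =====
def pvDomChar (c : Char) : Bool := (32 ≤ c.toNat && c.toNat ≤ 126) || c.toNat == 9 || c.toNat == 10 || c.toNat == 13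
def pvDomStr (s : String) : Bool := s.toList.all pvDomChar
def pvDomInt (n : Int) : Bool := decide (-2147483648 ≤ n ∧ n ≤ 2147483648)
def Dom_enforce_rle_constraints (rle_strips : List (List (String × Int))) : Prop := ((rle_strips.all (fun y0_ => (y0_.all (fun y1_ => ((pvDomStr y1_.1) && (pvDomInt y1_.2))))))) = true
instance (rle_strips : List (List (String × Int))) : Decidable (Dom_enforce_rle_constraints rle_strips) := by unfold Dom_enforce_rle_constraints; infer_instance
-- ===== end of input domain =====

-- B replaces A's two in-place index passes (clamp loop, then per-6-chunk divmod distribution with a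
-- remainder branch) by one pure structural recursion peeling 6 strips at a time, where strip i gets the
-- closed-form ceiling top-up max(0, ceil((deficit-i)/n)) — no quotient/remainder pair, no branch.
-- NOTE: Python A mutates its argument in place and returns the same list object, Python B builds fresh
-- dicts — the equivalence proved here is about the RETURN value.

-- shared dict accessors (data representation only): strip['length'] read and write on the assoc list
def glen (s : List (String × Int)) : Int := (PySem.Dict.mk s).getD "length" 0
def gset (s : List (String × Int)) (v : Int) : List (String × Int) :=
  ((PySem.Dict.mk s).insert "length" v).items

-- ===== PORT A =====
-- Python A mutates the dicts in place (directly and through the aliased slice `group`); that mutation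
-- is encoded by writing the updated strips back at the same positions (set / same-length splice).
def enforce_rle_constraints (rle_strips : List (List (String × Int))) : List (List (String × Int)) :=
  -- pass 1: for i in range(len(rle_strips)): if length < 3: set it to 3
  let rs1 := (List.range rle_strips.length).foldl (fun rs i =>
      if glen (rs.getD i []) < 3 then rs.set i (gset (rs.getD i []) 3) else rs) rle_strips
  -- pass 2: for group_start in range(0, len, 6): distribute the deficit inside the group
  (PySem.List.pyRange 0 (rs1.length : Int) 6).foldl (fun rs gs =>
      let ge : Int := min (gs + 6) (rs.length : Int)
      let group := PySem.List.slice rs (some gs) (some ge)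
      let total := group.foldl (fun a s => a + glen s) 0
      if total < 36 then
        let deficit := 36 - total
        let pps := PySem.Int.floordiv deficit (group.length : Int)
        let rem := PySem.Int.mod deficit (group.length : Int)
        let group2 := (PySem.List.enumerate group).map (fun p =>
            let s1 := gset p.2 (glen p.2 + pps)
            if p.1 < rem then gset s1 (glen s1 + 1) else s1)
        PySem.List.slice rs (some 0) (some gs) ++ group2 ++ PySem.List.slice rs (some ge) (some (rs.length : Int))
      else rs) rs1

-- ===== PORT B =====
-- dict(s, length=max(s['length'], 3))
def clampStrip (s : List (String × Int)) : List (String × Int) := gset s (max (glen s) 3)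

-- the inner recursive `fix`: peel strips[:6], clamp, top up with max(0, -((i - deficit) // n)), recurse
def fixB (strips : List (List (String × Int))) : List (List (String × Int)) :=
  if h : strips = [] then []
  else
    let head := (PySem.List.slice strips none (some 6)).map clampStrip
    let deficit := 36 - head.foldl (fun a s => a + glen s) 0
    let n : Int := head.length
    ((PySem.List.enumerate head).map (fun p =>
        gset p.2 (glen p.2 + max 0 (-(PySem.Int.floordiv (p.1 - deficit) n))))) ++
      fixB (PySem.List.slice strips (some 6) none)
termination_by strips.length
decreasing_by
  rw [PySem.List.slice_from strips (by norm_num : (0:Int) ≤ 6)]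
  have := List.length_pos_of_ne_nil h
  have h6 : ((6:Int)).toNat = 6 := rfl
  simp only [List.length_drop, h6]
  omega

def enforce_rle_constraints_alt (rle_strips : List (List (String × Int))) : List (List (String × Int)) :=
  fixB rle_strips

-- ===== PRECONDITION & SPEC =====
-- Pre_ excludes strips without a "length" key (Python A raises KeyError there) and assoc lists whose
-- keys repeat (a Python dict cannot have duplicate keys, so such lists represent no Python input).
def Pre_enforce_rle_constraints (rle_strips : List (List (String × Int))) : Prop :=
  ∀ s ∈ rle_strips, (s.map Prod.fst).Nodup ∧ "length" ∈ s.map Prod.fst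
instance (rle_strips : List (List (String × Int))) : Decidable (Pre_enforce_rle_constraints rle_strips) := by
  unfold Pre_enforce_rle_constraints; infer_instance

def pvWitness_enforce_rle_constraints : (List (List (String × Int))) :=
  [[("length", 2)], [("color", 5), ("length", 40)]]

def Spec_enforce_rle_constraints (rle_strips : List (List (String × Int))) (out : List (List (String × Int))) : Prop := out = enforce_rle_constraints_alt rle_strips
instance (rle_strips : List (List (String × Int))) (out : List (List (String × Int))) : Decidable (Spec_enforce_rle_constraints rle_strips out) := by unfold Spec_enforce_rle_constraints; infer_instance

-- ===== CLAIM (what is proved, stated in full; the proofs are below) =====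
def Claim_equal_enforce_rle_constraints : Prop := ∀ (rle_strips : List (List (String × Int))), Dom_enforce_rle_constraints rle_strips → Pre_enforce_rle_constraints rle_strips → Spec_enforce_rle_constraints rle_strips (enforce_rle_constraints rle_strips)

-- ===== LEMMAS AND PROOFS =====

lemma gset_eq (s : List (String × Int)) (v : Int) :
    gset s v = if s.any (fun p => p.1 == "length")
      then s.map (fun p => if p.1 == "length" then ("length", v) else p)
      else s ++ [("length", v)] := by
  simp only [gset, PySem.Dict.insert, PySem.Dict.contains]
  split <;> rfl

lemma glen_eq (s : List (String × Int)) :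
    glen s = (Option.map (fun x => x.2) (List.find? (fun p => p.1 == "length") s)).getD 0 := rfl

lemma find?_map_repl (s : List (String × Int)) (v : Int) (h : s.any (fun p => p.1 == "length")) :
    List.find? (fun p => p.1 == "length")
      (s.map (fun p => if p.1 == "length" then ("length", v) else p)) = some ("length", v) := by
  induction s with
  | nil => simp at h
  | cons x xs ih =>
    cases hx : (x.1 == "length") with
    | true =>
      have hx' : x.1 = "length" := by simpa using hx
      simp [hx']
    | false =>
      simp only [List.any_cons, hx, Bool.false_or] at h
      simp only [List.map_cons, Bool.false_eq_true, if_false, List.find?, hx]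
      exact ih h

lemma any_map_repl (s : List (String × Int)) (v : Int) :
    (s.map (fun p => if p.1 == "length" then ("length", v) else p)).any (fun p => p.1 == "length")
      = s.any (fun p => p.1 == "length") := by
  rw [List.any_map]
  congr 1
  funext p
  cases hp : (p.1 == "length") <;> simp [Function.comp, hp]

lemma map_repl_id (s : List (String × Int)) (v : Int) (h : ¬ s.any (fun p => p.1 == "length")) :
    s.map (fun p => if p.1 == "length" then ("length", v) else p) = s := by
  induction s with
  | nil => simp
  | cons x xs ih =>
    simp only [List.any_cons, Bool.or_eq_true, not_or] at h
    have hx : (x.1 == "length") = false := by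
      cases hq : (x.1 == "length") <;> simp_all
    simp only [List.map_cons, hx, Bool.false_eq_true, if_false]
    rw [ih (by simp [h.2])]

lemma glen_gset (s : List (String × Int)) (v : Int) : glen (gset s v) = v := by
  rw [gset_eq, glen_eq]
  split
  · rw [find?_map_repl s v (by assumption)]; rfl
  · rename_i h
    rw [List.find?_append]
    have : List.find? (fun p => p.1 == "length") s = none := by
      rw [List.find?_eq_none]
      intro p hp hc
      exact h (List.any_eq_true.mpr ⟨p, hp, hc⟩)
    simp [this]

lemma gset_gset (s : List (String × Int)) (v w : Int) : gset (gset s v) w = gset s w := by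
  rw [gset_eq s v, gset_eq s w]
  split
  · rename_i h
    rw [gset_eq, any_map_repl, if_pos h, List.map_map]
    congr 1
    funext p
    cases hp : (p.1 == "length") <;> simp [Function.comp, hp]
  · rename_i h
    rw [gset_eq, if_pos (by simp)]
    rw [List.map_append, map_repl_id s w h]
    simp

lemma gset_glen (s : List (String × Int)) (h : (s.map Prod.fst).Nodup)
    (hk : "length" ∈ s.map Prod.fst) : gset s (glen s) = s := by
  have hany : s.any (fun p => p.1 == "length") = true := by
    simp only [List.any_eq_true, beq_iff_eq]
    simpa using hk
  rw [gset_eq, if_pos hany]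
  induction s with
  | nil => simp at hk
  | cons x xs ih =>
    cases hx : (x.1 == "length") with
    | true =>
      have hx' : x.1 = "length" := by simpa using hx
      have hglen : glen (x :: xs) = x.2 := by
        rw [glen_eq]; simp [List.find?, hx]
      simp only [List.map_cons, hx, if_true, hglen]
      have hnone : ¬ xs.any (fun p => p.1 == "length") := by
        simp only [List.map_cons, List.nodup_cons] at h
        simp only [List.any_eq_true, beq_iff_eq, not_exists]
        intro p hpc
        exact h.1 (hx' ▸ hpc.2 ▸ List.mem_map_of_mem hpc.1)
      rw [map_repl_id xs _ hnone]
      simp [Prod.ext_iff, hx']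
    | false =>
      have hx' : x.1 ≠ "length" := by simpa using hx
      have hk' : "length" ∈ xs.map Prod.fst := by
        simp only [List.map_cons, List.mem_cons] at hk
        rcases hk with hk | hk
        · exact absurd hk.symm hx'
        · exact hk
      have h' : (xs.map Prod.fst).Nodup := by
        simp only [List.map_cons, List.nodup_cons] at h; exact h.2
      have hany' : xs.any (fun p => p.1 == "length") = true := by
        simp only [List.any_eq_true, beq_iff_eq]; simpa using hk'
      have hglen : glen (x :: xs) = glen xs := by
        rw [glen_eq, glen_eq, List.find?, hx]
      simp only [List.map_cons, hx, Bool.false_eq_true, if_false, hglen]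
      rw [ih h' hk' hany']

def clampA (s : List (String × Int)) : List (String × Int) :=
  if glen s < 3 then gset s 3 else s

def gAdj (group : List (List (String × Int))) : List (List (String × Int)) :=
  if 36 - group.foldl (fun a s => a + glen s) 0 > 0 then
    (PySem.List.enumerate group).map (fun p =>
      gset p.2 (glen p.2 + PySem.Int.floordiv (36 - group.foldl (fun a s => a + glen s) 0) (group.length : Int)
        + (if p.1 < PySem.Int.mod (36 - group.foldl (fun a s => a + glen s) 0) (group.length : Int) then 1 else 0)))
  else group

lemma clamp_eq (s : List (String × Int)) (h : (s.map Prod.fst).Nodup)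
    (hk : "length" ∈ s.map Prod.fst) : clampA s = clampStrip s := by
  unfold clampA clampStrip
  split
  · rename_i hlt
    have : max (glen s) 3 = 3 := by omega
    rw [this]
  · rename_i hge
    have : max (glen s) 3 = glen s := by omega
    rw [this, gset_glen s h hk]

lemma length_gAdj (g : List (List (String × Int))) : (gAdj g).length = g.length := by
  unfold gAdj
  split
  · simp [PySem.List.length_enumerate]
  · rfl

lemma groupA_eq (group : List (List (String × Int))) :
    (if group.foldl (fun a s => a + glen s) 0 < 36 then
      (PySem.List.enumerate group).map (fun p =>
        let s1 := gset p.2 (glen p.2 + PySem.Int.floordiv (36 - group.foldl (fun a s => a + glen s) 0) (group.length : Int))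
        if p.1 < PySem.Int.mod (36 - group.foldl (fun a s => a + glen s) 0) (group.length : Int)
        then gset s1 (glen s1 + 1) else s1)
     else group) = gAdj group := by
  unfold gAdj
  have hc : (group.foldl (fun a s => a + glen s) 0 < 36) ↔ (36 - group.foldl (fun a s => a + glen s) 0 > 0) := by omega
  split <;> split <;> rename_i h1 h2
  · apply List.map_congr_left
    intro p _
    dsimp only
    simp only [glen_gset, gset_gset]
    split <;> simp
  · exact absurd (hc.mp h1) h2
  · exact absurd (hc.mpr h2) h1
  · rfl

lemma pyRange6_nil (a b : Int) (h : b ≤ a) : PySem.List.pyRange a b 6 = [] := by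
  rw [PySem.List.pyRange_of_pos a b (by norm_num)]
  rw [if_neg (by omega)]
  simp

lemma pyRange6_cons (a b : Int) (h : a < b) :
    PySem.List.pyRange a b 6 = a :: PySem.List.pyRange (a + 6) b 6 := by
  rw [PySem.List.pyRange_of_pos a b (by norm_num), PySem.List.pyRange_of_pos (a+6) b (by norm_num)]
  rw [if_pos h]
  by_cases h6 : a + 6 < b
  · rw [if_pos h6]
    have hcount : ((b - a + 6 - 1) / 6).toNat = ((b - (a+6) + 6 - 1) / 6).toNat + 1 := by
      have : b - a + 6 - 1 = (b - (a+6) + 6 - 1) + 1 * 6 := by ring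
      rw [this, Int.add_mul_ediv_right _ _ (by norm_num)]
      have h1 : 0 ≤ (b - (a+6) + 6 - 1) / 6 := Int.ediv_nonneg (by omega) (by norm_num)
      omega
    rw [hcount, List.range_succ_eq_map]
    simp only [List.map_cons, List.map_map]
    congr 1
    · ring_nf
    · apply List.map_congr_left
      intro k _
      simp [Function.comp]
      push_cast
      ring
  · rw [if_neg h6]
    have hcount : ((b - a + 6 - 1) / 6).toNat = 1 := by
      have h1 : (b - a + 6 - 1) / 6 = 1 := by
        have h2 := Int.ediv_add_emod (b - a + 6 - 1) 6
        have h3 : 0 ≤ (b - a + 6 - 1) % 6 := Int.emod_nonneg _ (by norm_num)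
        have h4 : (b - a + 6 - 1) % 6 < 6 := Int.emod_lt_of_pos _ (by norm_num)
        nlinarith [sq_nonneg ((b - a + 6 - 1) / 6 - 1)]
      omega
    rw [hcount]
    simp

lemma pass1_eq (xs : List (List (String × Int))) (n : Nat) (hn : n ≤ xs.length) :
    (List.range n).foldl (fun rs i =>
      if glen (rs.getD i []) < 3 then rs.set i (gset (rs.getD i []) 3) else rs) xs
    = (xs.take n).map clampA ++ xs.drop n := by
  induction n with
  | zero => simp
  | succ n ih =>
    have hn' : n < xs.length := by omega
    rw [List.range_succ, List.foldl_append, ih (by omega)]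
    set prev := (xs.take n).map clampA ++ xs.drop n with hprev
    have hlen : ((xs.take n).map clampA).length = n := by
      simp [List.length_take, Nat.min_eq_left (by omega : n ≤ xs.length)]
    have hget : prev.getD n [] = xs[n] := by
      rw [hprev, List.getD, List.getElem?_append_right (by omega), hlen]
      simp [List.getElem?_drop, List.getElem?_eq_getElem hn']
    have hdrop : xs.drop n = xs[n] :: xs.drop (n+1) := List.drop_eq_getElem_cons hn'
    have htake : xs.take (n+1) = xs.take n ++ [xs[n]] := by
      rw [List.take_add_one]
      simp [List.getElem?_eq_getElem hn']
    simp only [List.foldl_cons, List.foldl_nil, hget]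
    by_cases hc : glen xs[n] < 3
    · rw [if_pos hc]
      rw [hprev, hdrop, htake]
      rw [List.set_append_right _ _ (by omega)]
      simp only [hlen, Nat.sub_self, List.set_cons_zero]
      simp only [List.map_append, List.map_cons, List.map_nil, List.append_assoc, List.cons_append, List.nil_append]
      congr 2
      unfold clampA
      rw [if_pos hc]
    · rw [if_neg hc]
      rw [hprev, hdrop, htake]
      simp only [List.map_append, List.map_cons, List.map_nil, List.append_assoc, List.cons_append, List.nil_append]
      congr 2
      unfold clampA
      rw [if_neg hc]

def chunks6 (xs : List (List (String × Int))) : List (List (List (String × Int))) :=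
  if xs = [] then [] else xs.take 6 :: chunks6 (xs.drop 6)
termination_by xs.length
decreasing_by rename_i h; have := List.length_pos_of_ne_nil h; simp only [List.length_drop]; omega

lemma chunks6_nil : chunks6 [] = [] := by rw [chunks6]; simp

lemma chunks6_cons (rest : List (List (String × Int))) (h : rest ≠ []) :
    chunks6 rest = rest.take 6 :: chunks6 (rest.drop 6) := by
  rw [chunks6]; simp [h]

lemma take_min6 (rest : List (List (String × Int))) : rest.take (min 6 rest.length) = rest.take 6 := by
  by_cases h : rest.length ≤ 6
  · rw [Nat.min_eq_right h, List.take_length, List.take_of_length_le h]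
  · rw [Nat.min_eq_left (by omega)]

lemma drop_min6 (rest : List (List (String × Int))) : rest.drop (min 6 rest.length) = rest.drop 6 := by
  by_cases h : rest.length ≤ 6
  · rw [Nat.min_eq_right h, List.drop_length, List.drop_eq_nil_of_le h]
  · rw [Nat.min_eq_left (by omega)]

lemma lemA : ∀ (m : Nat) (rest done : List (List (String × Int))), rest.length = m →
    (PySem.List.pyRange (done.length : Int) ((done.length : Int) + (rest.length : Int)) 6).foldl (fun rs gs =>
      let ge : Int := min (gs + 6) (rs.length : Int)
      let group := PySem.List.slice rs (some gs) (some ge)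
      let total := group.foldl (fun a s => a + glen s) 0
      if total < 36 then
        let deficit := 36 - total
        let pps := PySem.Int.floordiv deficit (group.length : Int)
        let rem := PySem.Int.mod deficit (group.length : Int)
        let group2 := (PySem.List.enumerate group).map (fun p =>
            let s1 := gset p.2 (glen p.2 + pps)
            if p.1 < rem then gset s1 (glen s1 + 1) else s1)
        PySem.List.slice rs (some 0) (some gs) ++ group2 ++ PySem.List.slice rs (some ge) (some (rs.length : Int))
      else rs) (done ++ rest)
    = done ++ (chunks6 rest).flatMap gAdj := by
  intro m
  induction m using Nat.strong_induction_on with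
  | _ m ih =>
    intro rest done hm
    by_cases hnil : rest = []
    · subst hnil
      rw [pyRange6_nil _ _ (by simp)]
      simp [chunks6_nil]
    · have hpos : 0 < rest.length := List.length_pos_of_ne_nil hnil
      rw [pyRange6_cons _ _ (by push_cast; omega), List.foldl_cons]
      beta_reduce
      dsimp only
      have hM : min ((done.length : Int) + 6) (((done ++ rest).length : Int)) = ((done.length + min 6 rest.length : Nat) : Int) := by
        simp only [List.length_append]
        push_cast
        omega
      rw [hM]
      have hslice : PySem.List.slice (done ++ rest) (some (done.length : Int)) (some ((done.length + min 6 rest.length : Nat) : Int)) = rest.take 6 := by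
        rw [PySem.List.slice_natCast, List.drop_left]
        rw [show done.length + min 6 rest.length - done.length = min 6 rest.length by omega]
        exact take_min6 rest
      rw [hslice]
      have hslice0 : PySem.List.slice (done ++ rest) (some 0) (some (done.length : Int)) = done := by
        rw [PySem.List.slice_zero_start, PySem.List.slice_to_natCast, List.take_left]
      have hsliceE : PySem.List.slice (done ++ rest) (some ((done.length + min 6 rest.length : Nat) : Int)) (some (((done ++ rest).length : Int))) = rest.drop 6 := by
        rw [show (((done ++ rest).length : Nat) : Int) = ((done.length + rest.length : Nat) : Int) by simp]
        rw [PySem.List.slice_natCast]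
        rw [show ((done ++ rest).drop (done.length + min 6 rest.length)) = rest.drop (min 6 rest.length) by
          rw [← List.drop_drop, List.drop_left]]
        rw [drop_min6]
        apply List.take_of_length_le
        simp only [List.length_drop]
        omega
      rw [hslice0, hsliceE]
      have hacc : (if (rest.take 6).foldl (fun a s => a + glen s) 0 < 36 then
          done ++ (PySem.List.enumerate (rest.take 6)).map (fun p =>
            let s1 := gset p.2 (glen p.2 + PySem.Int.floordiv (36 - (rest.take 6).foldl (fun a s => a + glen s) 0) ((rest.take 6).length : Int))
            if p.1 < PySem.Int.mod (36 - (rest.take 6).foldl (fun a s => a + glen s) 0) ((rest.take 6).length : Int)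
            then gset s1 (glen s1 + 1) else s1) ++ rest.drop 6
         else done ++ rest)
        = done ++ gAdj (rest.take 6) ++ rest.drop 6 := by
        rw [← groupA_eq (rest.take 6)]
        split
        · rfl
        · conv_lhs => rw [← List.take_append_drop 6 rest]
          rw [← List.append_assoc]
      rw [hacc]
      by_cases hle : rest.length ≤ 6
      · rw [pyRange6_nil _ _ (by push_cast; omega)]
        simp only [List.foldl_nil]
        rw [chunks6_cons rest hnil, List.drop_eq_nil_of_le hle, chunks6_nil]
        simp
      · have hlen6 : (done ++ gAdj (rest.take 6)).length = done.length + 6 := by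
          rw [List.length_append, length_gAdj, List.length_take]
          omega
        have hlen' : (rest.drop 6).length = m - 6 := by
          simp [List.length_drop]; omega
        have hIH := ih (m - 6) (by omega) (rest.drop 6) (done ++ gAdj (rest.take 6)) hlen'
        dsimp only at hIH
        rw [hlen6] at hIH
        rw [show ((done.length + 6 : Nat) : Int) = (done.length : Int) + 6 by push_cast; ring] at hIH
        have hend : (done.length : Int) + 6 + ((rest.drop 6).length : Int) = (done.length : Int) + (rest.length : Int) := by
          simp only [List.length_drop]
          push_cast
          omega
        rw [hend] at hIH
        rw [List.append_assoc] at hIH ⊢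
        rw [hIH]
        rw [chunks6_cons rest hnil]
        simp [List.append_assoc]

-- ===== B-side lemmas =====

lemma ediv_neg_small (b n : Int) (hn : 0 < n) (h1 : -n ≤ b) (h2 : b < 0) : b / n = -1 := by
  have key : ((b + n) + (-1) * n) / n = (b + n) / n + (-1) :=
    Int.add_mul_ediv_right _ _ (by omega)
  have h0 : (b + n) / n = 0 := Int.ediv_eq_zero_of_lt (by omega) (by omega)
  have : (b + n) + (-1) * n = b := by ring
  rw [this, h0] at key
  omega

lemma ceil_split (d n k : Int) (hn : 0 < n) (hk0 : 0 ≤ k) (hkn : k < n) (hd : 0 < d) :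
    max 0 (-((k - d) / n)) = d / n + (if k < d % n then 1 else 0) := by
  have hq : 0 ≤ d / n := Int.ediv_nonneg (by omega) (by omega)
  have hr0 : 0 ≤ d % n := Int.emod_nonneg _ (by omega)
  have hrn : d % n < n := Int.emod_lt_of_pos _ hn
  have hsplit : (k - d) / n = (k - d % n) / n + (-(d / n)) := by
    have hdm := Int.emod_add_ediv d n
    have hcomm : n * (d / n) = d / n * n := mul_comm _ _
    have : k - d = (k - d % n) + (-(d / n)) * n := by
      rw [neg_mul]
      omega
    rw [this, Int.add_mul_ediv_right _ _ (by omega : n ≠ 0)]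
  rw [hsplit]
  by_cases hk : k < d % n
  · rw [if_pos hk, ediv_neg_small _ _ hn (by omega) (by omega)]
    omega
  · rw [if_neg hk, Int.ediv_eq_zero_of_lt (by omega) (by omega)]
    omega

def bAdj (group : List (List (String × Int))) : List (List (String × Int)) :=
  (PySem.List.enumerate group).map (fun p =>
    gset p.2 (glen p.2 + max 0 (-(PySem.Int.floordiv
      (p.1 - (36 - group.foldl (fun a s => a + glen s) 0)) (group.length : Int)))))

lemma bAdj_eq_gAdj (ys : List (List (String × Int))) (hne : ys ≠ []) :
    bAdj (ys.map clampStrip) = gAdj (ys.map clampStrip) := by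
  set g := ys.map clampStrip with hg
  have hlen : 0 < g.length := by
    rw [hg, List.length_map]
    exact List.length_pos_of_ne_nil hne
  have hn : (0 : Int) < (g.length : Int) := by exact_mod_cast hlen
  set d : Int := 36 - g.foldl (fun a s => a + glen s) 0 with hd
  unfold bAdj gAdj
  rw [← hd]
  by_cases hdp : d > 0
  · rw [if_pos hdp]
    apply List.map_congr_left
    intro p hp
    rcases (PySem.List.mem_enumerate_iff _ _ _).mp hp with ⟨k, hk, hpk⟩
    subst hpk
    dsimp only
    congr 1
    rw [PySem.Int.floordiv_eq_ediv_of_pos hn, PySem.Int.floordiv_eq_ediv_of_pos hn,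
        PySem.Int.mod_eq_emod_of_pos hn]
    rw [zero_add]
    rw [ceil_split d (g.length : Int) (k : Int) hn (by positivity) (by exact_mod_cast hk) hdp]
    ring
  · rw [if_neg hdp]
    have hid : ∀ p ∈ PySem.List.enumerate g,
        gset p.2 (glen p.2 + max 0 (-(PySem.Int.floordiv (p.1 - d) (g.length : Int)))) = p.2 := by
      intro p hp
      rcases (PySem.List.mem_enumerate_iff _ _ _).mp hp with ⟨k, hk, hpk⟩
      have hmax : max 0 (-(PySem.Int.floordiv (p.1 - d) (g.length : Int))) = 0 := by
        rw [PySem.Int.floordiv_eq_ediv_of_pos hn]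
        have hnum : 0 ≤ p.1 - d := by
          have : p.1 = (k : Int) := by rw [hpk]; simp
          omega
        have := Int.ediv_nonneg hnum (le_of_lt hn)
        omega
      rw [hmax, add_zero]
      have hmem : p.2 ∈ g := by
        rw [hpk]
        exact List.getElem_mem hk
      rcases List.mem_map.mp (hg ▸ hmem) with ⟨s, _, hs⟩
      rw [← hs]
      unfold clampStrip
      rw [glen_gset, gset_gset]
    calc (PySem.List.enumerate g).map (fun p =>
          gset p.2 (glen p.2 + max 0 (-(PySem.Int.floordiv (p.1 - d) (g.length : Int)))))
        = (PySem.List.enumerate g).map (fun p => p.2) := List.map_congr_left hid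
      _ = g := PySem.List.map_snd_enumerate g 0

lemma fixB_chunks : ∀ (m : Nat) (strips : List (List (String × Int))), strips.length = m →
    fixB strips = (chunks6 (strips.map clampStrip)).flatMap gAdj := by
  intro m
  induction m using Nat.strong_induction_on with
  | _ m ih =>
    intro strips hm
    by_cases hnil : strips = []
    · subst hnil
      rw [fixB]
      simp [chunks6_nil]
    · have hsl1 : PySem.List.slice strips none (some 6) = strips.take 6 := by
        rw [PySem.List.slice_to strips (by norm_num : (0:Int) ≤ 6)]
        rfl
      have hsl2 : PySem.List.slice strips (some 6) none = strips.drop 6 := by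
        rw [PySem.List.slice_from strips (by norm_num : (0:Int) ≤ 6)]
        rfl
      have hstep : fixB strips
          = bAdj ((PySem.List.slice strips none (some 6)).map clampStrip)
            ++ fixB (PySem.List.slice strips (some 6) none) := by
        rw [fixB, dif_neg hnil]
        rfl
      rw [hsl1, hsl2] at hstep
      rw [hstep]
      have hhead : (strips.take 6).map clampStrip = (strips.map clampStrip).take 6 := by
        rw [List.map_take]
      rw [bAdj_eq_gAdj (strips.take 6) (by
        intro hc
        have := congrArg List.length hc
        simp only [List.length_take, List.length_nil] at this
        have := List.length_pos_of_ne_nil hnil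
        omega)]
      have hpos := List.length_pos_of_ne_nil hnil
      have hIH := ih (m - 6) (by omega) (strips.drop 6) (by simp [List.length_drop]; omega)
      rw [hIH]
      rw [chunks6_cons (strips.map clampStrip) (by simpa using hnil)]
      rw [List.flatMap_cons, ← hhead, List.map_drop]

-- ===== VERDICT (by name: the statement is the Claim_ definition above) =====
theorem enforce_rle_constraints_spec : Claim_equal_enforce_rle_constraints := by
  intro xs _hdom hpre
  unfold Spec_enforce_rle_constraints
  have hclamp : xs.map clampA = xs.map clampStrip :=
    List.map_congr_left (fun s hs => clamp_eq s (hpre s hs).1 (hpre s hs).2)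
  have hA := lemA (xs.map clampA).length (xs.map clampA) [] rfl
  dsimp only at hA
  simp only [List.length_nil, Nat.cast_zero, zero_add, List.nil_append] at hA
  rw [hclamp] at hA
  unfold enforce_rle_constraints enforce_rle_constraints_alt
  dsimp only
  rw [pass1_eq xs xs.length le_rfl, List.take_length, List.drop_length, List.append_nil, hclamp]
  rw [hA, fixB_chunks xs.length xs rfl]
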